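-- pv_equiv track=rewrite | github.com/BartSte/homepage | src/homepage/parser.py | _parse_org_table
-- ===== SOURCE A (Python) =====
-- def _parse_org_table(lines: list[str]) -> list[dict]:
--     """Parse an org-mode pipe table into a list of dicts."""
--     rows = []
--     headers = None
--     for line in lines:
--         s = line.strip()
--         if not s.startswith("|"):
--             break
--         # Skip separator rows like |---+---|
--         inner = s.strip("|").replace("+", "").replace("-", "").replace(" ", "")
--         if not inner:
--             continue
--         cols = [c.strip() for c in s.strip("|").split("|")]
--         if headers is None:
--             headers = cols
--         else:
--             rows.append(dict(zip(headers, cols)))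
--     return rows
-- ===== SOURCE B (Python) =====
-- def _parse_org_table(lines: list[str]) -> list[dict]:
--     """Parse an org-mode pipe table into a list of dicts.
--
--     Recursive-descent parser in two phases: `table` consumes lines until it
--     finds the header row (skipping separators, stopping at the first
--     non-pipe line), then hands off to `rows`, which recursively consumes
--     the remaining data rows and builds the result front-to-back by cons."""
--
--     def cells(s):
--         return [c.strip() for c in s.strip("|").split("|")]
--
--     def is_sep(s):
--         return not s.strip("|").replace("+", "").replace("-", "").replace(" ", "")
--
--     def rows(rest, headers):
--         if not rest:
--             return []
--         s = rest[0].strip()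
--         if not s.startswith("|"):
--             return []
--         if is_sep(s):
--             return rows(rest[1:], headers)
--         return [dict(zip(headers, cells(s)))] + rows(rest[1:], headers)
--
--     def table(rest):
--         if not rest:
--             return []
--         s = rest[0].strip()
--         if not s.startswith("|"):
--             return []
--         if is_sep(s):
--             return table(rest[1:])
--         return rows(rest[1:], cells(s))
--
--     return table(lines)
-- ===== Notes on version B (the rewrite author's own statement) =====
-- stated objective: alternative
-- what changed: Replaces A's single stateful for-loop (break/continue with a headers flag and a rows accumulator) by a two-phase recursive-descent parser: a header phase that recursively skips separators until the header row, then a row phase that recursively consumes data rows and builds the result by cons, with no mutable state or accumulator.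
import Mathlib
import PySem

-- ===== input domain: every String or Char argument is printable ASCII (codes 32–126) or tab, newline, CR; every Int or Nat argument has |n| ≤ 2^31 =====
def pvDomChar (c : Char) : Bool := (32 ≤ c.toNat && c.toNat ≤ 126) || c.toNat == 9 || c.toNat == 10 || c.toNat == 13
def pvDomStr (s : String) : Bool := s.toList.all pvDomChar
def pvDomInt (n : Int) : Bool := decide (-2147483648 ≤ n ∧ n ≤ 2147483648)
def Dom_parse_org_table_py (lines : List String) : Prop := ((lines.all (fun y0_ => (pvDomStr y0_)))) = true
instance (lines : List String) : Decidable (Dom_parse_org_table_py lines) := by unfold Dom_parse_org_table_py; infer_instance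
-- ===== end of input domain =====

-- B replaces A's stateful break/continue loop by a two-phase recursive-descent parser (header phase, then row phase building the result by cons); objective: alternative.

-- ===== PORT A =====
-- the for-loop of A with its state (headers, rows); 'break' returns rows
def pvA_loop : List String → Option (List String) → List (List (String × String)) → List (List (String × String))
  | [], _, rows => rows
  | line :: rest, headers, rows =>
    let s := PySem.Str.strip line
    if PySem.Str.startswith s "|" then
      let inner := PySem.Str.replace (PySem.Str.replace (PySem.Str.replace (PySem.Str.stripChars s "|") "+" "") "-" "") " " ""
      if inner = "" then pvA_loop rest headers rows
      else
        -- [c.strip() for c in s.strip("|").split("|")]  (split with a nonempty sep, via Chars.splitOn)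
        let cols := (PySem.Chars.splitOn (PySem.Chars.stripChars s.toList ['|']) ['|']).map (fun c => String.mk (PySem.Chars.strip c))
        match headers with
        | none => pvA_loop rest (some cols) rows
        | some h => pvA_loop rest headers (rows ++ [(PySem.Dict.ofList (h.zip cols)).items])
    else rows

def parse_org_table_py (lines : List String) : List (List (String × String)) :=
  pvA_loop lines none []

-- ===== PORT B =====
-- cells(s): [c.strip() for c in s.strip("|").split("|")]  (split with a nonempty sep, via Chars.splitOn)
def pvB_cells (s : String) : List String :=
  (PySem.Chars.splitOn (PySem.Chars.stripChars s.toList ['|']) ['|']).map (fun c => String.mk (PySem.Chars.strip c))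

-- is_sep(s): not s.strip("|").replace("+","").replace("-","").replace(" ","")
def pvB_is_sep (s : String) : Bool :=
  PySem.Str.replace (PySem.Str.replace (PySem.Str.replace (PySem.Str.stripChars s "|") "+" "") "-" "") " " "" = ""

-- rows(rest, headers): row phase, builds the result by cons
def pvB_rows : List String → List String → List (List (String × String))
  | [], _ => []
  | line :: rest, headers =>
    let s := PySem.Str.strip line
    if PySem.Str.startswith s "|" then
      if pvB_is_sep s then pvB_rows rest headers
      else [(PySem.Dict.ofList (headers.zip (pvB_cells s))).items] ++ pvB_rows rest headers
    else []

-- table(rest): header phase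
def pvB_table : List String → List (List (String × String))
  | [] => []
  | line :: rest =>
    let s := PySem.Str.strip line
    if PySem.Str.startswith s "|" then
      if pvB_is_sep s then pvB_table rest
      else pvB_rows rest (pvB_cells s)
    else []

def parse_org_table_py_alt (lines : List String) : List (List (String × String)) :=
  pvB_table lines

-- ===== PRECONDITION & SPEC =====
def Spec_parse_org_table_py (lines : List String) (out : List (List (String × String))) : Prop := out = parse_org_table_py_alt lines
instance (lines : List String) (out : List (List (String × String))) : Decidable (Spec_parse_org_table_py lines out) := by unfold Spec_parse_org_table_py; infer_instance

-- ===== CLAIM (what is proved, stated in full; the proofs are below) =====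
def Claim_equal_parse_org_table_py : Prop := ∀ (lines : List String), Dom_parse_org_table_py lines → Spec_parse_org_table_py lines (parse_org_table_py lines)

-- ===== LEMMAS AND PROOFS =====

-- A's loop after the header is found is B's row phase (shifted by the accumulator)
theorem pvA_some (lines : List String) (h : List String)
    (rows : List (List (String × String))) :
    pvA_loop lines (some h) rows = rows ++ pvB_rows lines h := by
  induction lines generalizing rows with
  | nil => simp [pvA_loop, pvB_rows]
  | cons line rest ih =>
    show (if PySem.Str.startswith (PySem.Str.strip line) "|" then _ else rows) = _
    by_cases hst : PySem.Str.startswith (PySem.Str.strip line) "|"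
    · rw [if_pos hst]
      by_cases hsep : pvB_is_sep (PySem.Str.strip line)
      · have hsep' : (PySem.Str.replace (PySem.Str.replace (PySem.Str.replace
            (PySem.Str.stripChars (PySem.Str.strip line) "|") "+" "") "-" "") " " "" = "") := by
          simpa [pvB_is_sep] using hsep
        simp only [pvB_rows, hst, hsep, hsep', if_true]
        exact ih rows
      · have hsep' : ¬ (PySem.Str.replace (PySem.Str.replace (PySem.Str.replace
            (PySem.Str.stripChars (PySem.Str.strip line) "|") "+" "") "-" "") " " "" = "") := by
          simpa [pvB_is_sep] using hsep
        simp only [pvB_rows, hst, hsep, hsep', Bool.false_eq_true, if_false, if_true]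
        rw [ih]
        simp [pvB_cells]
    · rw [if_neg hst]
      have hst' : PySem.Chars.startswith (PySem.Chars.strip line.toList) ['|'] = false := by
        simpa using hst
      simp [pvB_rows, hst']

-- A's loop before the header is found is B's header phase
theorem pvA_none (lines : List String) (rows : List (List (String × String))) :
    pvA_loop lines none rows = rows ++ pvB_table lines := by
  induction lines generalizing rows with
  | nil => simp [pvA_loop, pvB_table]
  | cons line rest ih =>
    show (if PySem.Str.startswith (PySem.Str.strip line) "|" then _ else rows) = _
    by_cases hst : PySem.Str.startswith (PySem.Str.strip line) "|"
    · rw [if_pos hst]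
      by_cases hsep : pvB_is_sep (PySem.Str.strip line)
      · have hsep' : (PySem.Str.replace (PySem.Str.replace (PySem.Str.replace
            (PySem.Str.stripChars (PySem.Str.strip line) "|") "+" "") "-" "") " " "" = "") := by
          simpa [pvB_is_sep] using hsep
        simp only [pvB_table, hst, hsep, hsep', if_true]
        exact ih rows
      · have hsep' : ¬ (PySem.Str.replace (PySem.Str.replace (PySem.Str.replace
            (PySem.Str.stripChars (PySem.Str.strip line) "|") "+" "") "-" "") " " "" = "") := by
          simpa [pvB_is_sep] using hsep
        simp only [pvB_table, hst, hsep, hsep', Bool.false_eq_true, if_false, if_true]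
        rw [pvA_some]
        simp [pvB_cells]
    · rw [if_neg hst]
      have hst' : PySem.Chars.startswith (PySem.Chars.strip line.toList) ['|'] = false := by
        simpa using hst
      simp [pvB_table, hst']

-- ===== VERDICT (by name: the statement is the Claim_ definition above) =====
theorem parse_org_table_py_spec : Claim_equal_parse_org_table_py := by
  intro lines _
  unfold Spec_parse_org_table_py parse_org_table_py parse_org_table_py_alt
  rw [pvA_none]
  rfl
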